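-- pv_equiv track=rewrite | github.com/apassuello/technical-rag-system | tests/epic2_validation/component_specific/epic2_component_test_utilities.py | create_test_queries
-- ===== SOURCE A (Python) =====
-- from typing import Dict, List, Any, Optional, Tuple, Union, Type
--
-- def create_test_queries(count: int = 20) -> List[str]:
--     """Create diverse test queries for component testing."""
--     queries = [
--         # Technical queries
--         "RISC-V instruction set architecture",
--         "pipeline hazard detection",
--         "branch prediction algorithms",
--         "cache coherency protocols",
--         "vector processing instructions",
--         "floating-point operations",
--         "interrupt handling mechanisms",
--         "virtual memory management",
--         "performance monitoring tools",
--         "debugging and trace capabilities",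
--         # Performance queries
--         "optimization techniques",
--         "latency reduction methods",
--         "throughput improvements",
--         "energy efficiency",
--         "parallel processing",
--         # Implementation queries
--         "hardware implementation",
--         "software stack integration",
--         "system architecture design",
--         "resource allocation strategies",
--         "execution unit design",
--     ]
--
--     # Extend if needed
--     while len(queries) < count:
--         queries.extend(queries[: min(len(queries), count - len(queries))])
--
--     return queries[:count]
-- ===== SOURCE B (Python) =====
-- from typing import List
--
-- def create_test_queries(count: int = 20) -> List[str]:
--     """Create diverse test queries for component testing."""
--     queries = [
--         # Technical queries
--         "RISC-V instruction set architecture",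
--         "pipeline hazard detection",
--         "branch prediction algorithms",
--         "cache coherency protocols",
--         "vector processing instructions",
--         "floating-point operations",
--         "interrupt handling mechanisms",
--         "virtual memory management",
--         "performance monitoring tools",
--         "debugging and trace capabilities",
--         # Performance queries
--         "optimization techniques",
--         "latency reduction methods",
--         "throughput improvements",
--         "energy efficiency",
--         "parallel processing",
--         # Implementation queries
--         "hardware implementation",
--         "software stack integration",
--         "system architecture design",
--         "resource allocation strategies",
--         "execution unit design",
--     ]
--     n = len(queries)
--     if count <= n:
--         return queries[:count]
--     return [queries[i % n] for i in range(count)]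
-- ===== Notes on version B (the rewrite author's own statement) =====
-- stated objective: idiomatic
-- what changed: Replaces the geometric self-extend-and-slice loop by a direct closed cyclic mapping: for count beyond the base list, each element is produced as base[i % n] over range(count); small counts return base[:count].
import Mathlib
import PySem

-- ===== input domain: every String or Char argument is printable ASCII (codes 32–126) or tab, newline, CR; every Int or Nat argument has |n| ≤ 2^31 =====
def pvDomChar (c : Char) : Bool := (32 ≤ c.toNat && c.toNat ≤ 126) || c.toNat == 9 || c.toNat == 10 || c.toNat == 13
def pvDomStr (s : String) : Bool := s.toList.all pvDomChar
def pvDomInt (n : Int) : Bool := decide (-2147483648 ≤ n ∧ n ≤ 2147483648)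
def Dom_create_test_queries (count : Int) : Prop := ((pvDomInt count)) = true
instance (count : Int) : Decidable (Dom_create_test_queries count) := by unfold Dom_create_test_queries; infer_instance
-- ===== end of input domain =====

-- B replaces A's geometric self-extend-and-slice loop by a direct cyclic mapping base[i % 20];
-- same return value for every int count (idiomatic, not claimed faster).

-- ===== PORT A =====
-- the literal base list of 20 query strings from the Python source
def ctqBase : List String := [
  "RISC-V instruction set architecture",
  "pipeline hazard detection",
  "branch prediction algorithms",
  "cache coherency protocols",
  "vector processing instructions",
  "floating-point operations",
  "interrupt handling mechanisms",
  "virtual memory management",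
  "performance monitoring tools",
  "debugging and trace capabilities",
  "optimization techniques",
  "latency reduction methods",
  "throughput improvements",
  "energy efficiency",
  "parallel processing",
  "hardware implementation",
  "software stack integration",
  "system architecture design",
  "resource allocation strategies",
  "execution unit design"]

-- 'while len(queries) < count: queries.extend(queries[:min(len(queries), count-len(queries))])'
-- (fuel only makes the recursion total; each iteration grows the list by ≥ 1, so count.toNat fuel always suffices)
def ctqLoop (count : Int) (fuel : Nat) (qs : List String) : List String :=
  match fuel with
  | 0 => qs
  | fuel + 1 =>
      if (qs.length : Int) < count then
        ctqLoop count fuel (qs ++ qs.take (min (qs.length : Int) (count - qs.length)).toNat)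
      else qs

def create_test_queries (count : Int) : List String :=
  PySem.List.slice (ctqLoop count count.toNat ctqBase) none (some count)

-- ===== PORT B =====
-- if count <= n: return queries[:count]; else [queries[i % n] for i in range(count)]
def create_test_queries_alt (count : Int) : List String :=
  if count ≤ (ctqBase.length : Int) then
    PySem.List.slice ctqBase none (some count)
  else
    (PySem.List.pyRange 0 count 1).map
      (fun i => PySem.List.pyGetD ctqBase (PySem.Int.mod i (ctqBase.length : Int)) "")

-- ===== PRECONDITION & SPEC =====
def Spec_create_test_queries (count : Int) (out : List String) : Prop := out = create_test_queries_alt count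
instance (count : Int) (out : List String) : Decidable (Spec_create_test_queries count out) := by unfold Spec_create_test_queries; infer_instance

-- ===== CLAIM (what is proved, stated in full; the proofs are below) =====
def Claim_equal_create_test_queries : Prop := ∀ (count : Int), Dom_create_test_queries count → Spec_create_test_queries count (create_test_queries count)

-- ===== LEMMAS AND PROOFS =====

-- the cyclic list of length m over the base queries
def ctqCyc (m : Nat) : List String := (List.range m).map (fun i => ctqBase.getD (i % 20) "")

lemma ctqCyc_twenty : ctqCyc 20 = ctqBase := by decide

lemma length_ctqCyc (m : Nat) : (ctqCyc m).length = m := by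
  simp [ctqCyc]

lemma ctqCyc_take (k m : Nat) (h : k ≤ m) : (ctqCyc m).take k = ctqCyc k := by
  simp only [ctqCyc, ← List.map_take, List.take_range, Nat.min_eq_left h]

lemma ctqCyc_append (L k : Nat) (hdvd : 20 ∣ L) :
    ctqCyc L ++ ctqCyc k = ctqCyc (L + k) := by
  simp only [ctqCyc, List.range_add, List.map_append, List.map_map]
  congr 1
  apply List.map_congr_left
  intro i _
  obtain ⟨c, rfl⟩ := hdvd
  simp [Function.comp]

lemma ctqLoop_done (count : Int) (fuel : Nat) (qs : List String)
    (h : count ≤ (qs.length : Int)) : ctqLoop count fuel qs = qs := by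
  cases fuel with
  | zero => rfl
  | succ n => simp [ctqLoop, not_lt.mpr h]

lemma ctqLoop_cyc (count : Int) (fuel L : Nat) (hdvd : 20 ∣ L) (hpos : 0 < L)
    (hfuel : count ≤ (L : Int) + fuel) :
    ctqLoop count fuel (ctqCyc L) = ctqCyc (max L count.toNat) := by
  induction fuel generalizing L with
  | zero =>
      have hc : count.toNat ≤ L := by omega
      rw [ctqLoop, Nat.max_eq_left hc]
  | succ n ih =>
      by_cases hlt : ((ctqCyc L).length : Int) < count
      · rw [length_ctqCyc] at hlt
        rw [ctqLoop, if_pos (by rw [length_ctqCyc]; exact hlt), length_ctqCyc]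
        set kI : Int := min (L : Int) (count - L) with hkI
        have hk0 : 0 < kI := by omega
        have hkL : kI.toNat ≤ L := by omega
        rw [ctqCyc_take kI.toNat L hkL, ctqCyc_append L kI.toNat hdvd]
        by_cases hdbl : (L : Int) ≤ count - L
        · -- full doubling: kI = L
          have hkeq : kI.toNat = L := by omega
          rw [hkeq]
          rw [ih (L + L) (by omega) (by omega) (by push_cast; omega)]
          congr 1
          omega
        · -- final partial extend: new length = count, loop terminates
          have hkeq : (L : Int) + kI = count := by omega
          have hlen : ((ctqCyc (L + kI.toNat)).length : Int) = count := by
            rw [length_ctqCyc]; omega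
          rw [ctqLoop_done count n _ (le_of_eq hlen.symm)]
          congr 1
          omega
      · rw [length_ctqCyc] at hlt
        rw [ctqLoop, if_neg (by rw [length_ctqCyc]; exact hlt)]
        congr 1
        omega

lemma ctqCyc_eq_alt (count : Int) (h : (20 : Int) < count) :
    create_test_queries_alt count = ctqCyc count.toNat := by
  have hb : (ctqBase.length : Int) = 20 := by decide
  rw [create_test_queries_alt, if_neg (by omega), hb]
  rw [PySem.List.pyRange_one]
  simp only [zero_add, Int.sub_zero, List.map_map]
  apply List.map_congr_left
  intro i _
  have h1 : PySem.Int.mod (i : Int) 20 = ((i % 20 : Nat) : Int) := by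
    exact_mod_cast PySem.Int.mod_natCast i 20
  simp only [Function.comp_apply]
  rw [h1, PySem.List.pyGetD_natCast]

-- ===== VERDICT (by name: the statement is the Claim_ definition above) =====
theorem create_test_queries_spec : Claim_equal_create_test_queries := by
  intro count _
  unfold Spec_create_test_queries
  by_cases h : count ≤ (20 : Int)
  · -- loop never runs: len(queries) = 20 ≥ count
    have hA : create_test_queries count = PySem.List.slice ctqBase none (some count) := by
      rw [create_test_queries, ctqLoop_done count _ ctqBase (by simpa using h)]
    have hb : (ctqBase.length : Int) = 20 := by decide
    rw [hA, create_test_queries_alt, if_pos (by omega)]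
  · have hN : (20 : Int) < count := lt_of_not_ge h
    have hcnt : (count.toNat : Int) = count := by omega
    have hA : create_test_queries count = ctqCyc count.toNat := by
      rw [create_test_queries, ← ctqCyc_twenty]
      rw [ctqLoop_cyc count count.toNat 20 ⟨1, rfl⟩ (by norm_num) (by omega)]
      rw [Nat.max_eq_right (by omega)]
      rw [PySem.List.slice_to _ (by omega)]
      rw [ctqCyc_take count.toNat count.toNat (le_refl _)]
    rw [hA, ctqCyc_eq_alt count hN]
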